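-- pv_equiv track=rewrite | github.com/pyctp/dataexplore | wavefunc2_pandas.py | get_HH2
-- ===== SOURCE A (Python) =====
-- def get_HH2(HH1):
--     # HH2: = VALUEWHEN(HH1 > 0, HH1);
--     HH2list = []
--     count = 0
--
--     for cc in range(len(HH1)):
--         hh1 = HH1[cc]
--
--         if hh1 > 0:
--             HH2list.append(hh1)
--             count += 1
--
--         elif count == 0:
--             HH2list.append(None)
--
--         elif count > 0:
--             HH2list.append(HH2list[-1])
--
--     return HH2list
-- ===== SOURCE B (Python) =====
-- def get_HH2(HH1):
--     # Run-length construction: emit the leading None-run, then one filled run per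
--     # positive value, instead of per-element carried state.
--     n = len(HH1)
--     i = 0
--     while i < n and HH1[i] <= 0:
--         i += 1
--     out = [None] * i
--     while i < n:
--         j = i + 1
--         while j < n and HH1[j] <= 0:
--             j += 1
--         out += [HH1[i]] * (j - i)
--         i = j
--     return out
-- ===== Notes on version B (the rewrite author's own statement) =====
-- stated objective: alternative
-- what changed: Replaces A's single per-element pass with carried state (a counter plus a peek at the previous output element) by a two-level run-length construction: scan to the end of each maximal non-positive run and emit the whole run at once (a None-run before any positive, then one replicated run per positive).
import Mathlib
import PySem

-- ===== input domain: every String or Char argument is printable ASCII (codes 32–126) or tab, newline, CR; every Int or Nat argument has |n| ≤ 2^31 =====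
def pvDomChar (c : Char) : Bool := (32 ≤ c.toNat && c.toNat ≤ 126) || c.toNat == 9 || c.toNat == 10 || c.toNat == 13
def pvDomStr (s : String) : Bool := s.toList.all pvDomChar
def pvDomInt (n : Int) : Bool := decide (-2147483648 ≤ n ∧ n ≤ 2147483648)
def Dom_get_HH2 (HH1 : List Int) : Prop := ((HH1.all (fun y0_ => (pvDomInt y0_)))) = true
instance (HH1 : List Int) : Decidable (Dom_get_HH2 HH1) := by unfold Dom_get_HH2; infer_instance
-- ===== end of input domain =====

-- B replaces A's per-element pass with carried state (counter + peek at the previous output element)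
-- by a run-length construction that emits whole runs at once; objective: alternative.

-- ===== PORT A =====
-- one loop step of A over state (HH2list, count); the peek at the last output element is ported as
-- (pyGet? lst (-1)).join — exact, since the branch runs only with count > 0, when the list is nonempty
def getHH2StepA (acc : List (Option Int) × Int) (hh1 : Int) : List (Option Int) × Int :=
  if hh1 > 0 then (acc.1 ++ [some hh1], acc.2 + 1)
  else if acc.2 == 0 then (acc.1 ++ [none], acc.2)
  else (acc.1 ++ [(PySem.List.pyGet? acc.1 (-1)).join], acc.2)

def get_HH2 (HH1 : List Int) : List (Option Int) :=
  ((PySem.List.pyRange 0 (HH1.length : Int) 1).foldl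
    (fun acc cc => getHH2StepA acc (PySem.List.pyGetD HH1 cc 0)) ([], 0)).1

-- ===== PORT B =====
-- B's inner scan 'while _ < n and HH1[_] <= 0: _ += 1' counted relative to the current suffix:
-- the length of the maximal non-positive prefix (exact — indices i/j only advance over that suffix)
def runlenB : List Int → Nat
  | [] => 0
  | x :: xs => if x ≤ 0 then runlenB xs + 1 else 0

-- B's outer 'while i < n' loop over the suffix starting at position i (which holds a positive value):
-- emit the run [HH1[i]] * (j - i) and continue at j
def buildB : List Int → List (Option Int)
  | [] => []
  | x :: xs => List.replicate (1 + runlenB xs) (some x) ++ buildB (xs.drop (runlenB xs))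
  termination_by l => l.length
  decreasing_by simp

def get_HH2_alt (HH1 : List Int) : List (Option Int) :=
  List.replicate (runlenB HH1) none ++ buildB (HH1.drop (runlenB HH1))

-- ===== PRECONDITION & SPEC =====
def Spec_get_HH2 (HH1 : List Int) (out : List (Option Int)) : Prop := out = get_HH2_alt HH1
instance (HH1 : List Int) (out : List (Option Int)) : Decidable (Spec_get_HH2 HH1 out) := by unfold Spec_get_HH2; infer_instance

-- ===== CLAIM (what is proved, stated in full; the proofs are below) =====
def Claim_equal_get_HH2 : Prop := ∀ (HH1 : List Int), Dom_get_HH2 HH1 → Spec_get_HH2 HH1 (get_HH2 HH1)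

-- ===== LEMMAS AND PROOFS =====

-- reference recursion both programs are reduced to: the carried 'last positive so far'
def carryG (last : Option Int) : List Int → List (Option Int)
  | [] => []
  | v :: vs => (if v > 0 then some v else last) :: carryG (if v > 0 then some v else last) vs

theorem getLast_pyGet?_neg_one (lst : List (Option Int)) (v : Option Int)
    (h : lst.getLast? = some v) : (PySem.List.pyGet? lst (-1)).join = v := by
  cases lst with
  | nil => simp at h
  | cons x xs =>
    simp [PySem.List.pyGet?, PySem.List.pyIdx?]
    have h2 : (x :: xs)[(x :: xs).length - 1]? = some v := by
      rw [← List.getLast?_eq_getElem?]; exact h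
    simp at h2
    simpa using h2

-- A's fold, reduced to the carry recursion
theorem loop_invariant (xs : List Int) (lst : List (Option Int)) (count : Int) (last : Option Int)
    (hnn : 0 ≤ count)
    (h0 : count = 0 → last = none)
    (h1 : count ≠ 0 → lst.getLast? = some last) :
    (xs.foldl getHH2StepA (lst, count)).1 = lst ++ carryG last xs := by
  induction xs generalizing lst count last with
  | nil => simp [carryG]
  | cons v vs ih =>
    simp only [List.foldl_cons]
    by_cases hv : v > 0
    · rw [show carryG last (v :: vs) = some v :: carryG (some v) vs from by simp [carryG, hv],
        List.append_cons,
        show getHH2StepA (lst, count) v = (lst ++ [some v], count + 1) from by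
          simp [getHH2StepA, hv]]
      exact ih (lst ++ [some v]) (count + 1) (some v) (by omega)
        (by intro h; omega) (by intro _; simp)
    · rw [show carryG last (v :: vs) = last :: carryG last vs from by simp [carryG, hv],
        List.append_cons]
      by_cases hc : count = 0
      · have hl := h0 hc
        rw [show getHH2StepA (lst, count) v = (lst ++ [none], count) from by
          simp [getHH2StepA, hv, hc], hl]
        exact ih (lst ++ [none]) count none hnn (fun _ => rfl) (by intro h; omega)
      · have hg := h1 hc
        have hj : (PySem.List.pyGet? lst (-1)).join = last :=
          getLast_pyGet?_neg_one lst last hg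
        rw [show getHH2StepA (lst, count) v = (lst ++ [last], count) from by
          simp [getHH2StepA, hv, hc, hj]]
        exact ih (lst ++ [last]) count last hnn (fun h => absurd h hc) (by intro _; simp)

-- over a maximal non-positive run the carry just replicates 'last'
theorem carryG_run (xs : List Int) (last : Option Int) :
    carryG last xs = List.replicate (runlenB xs) last ++ carryG last (xs.drop (runlenB xs)) := by
  induction xs generalizing last with
  | nil => simp [runlenB]
  | cons x xs ih =>
    by_cases hx : x ≤ 0
    · have hv : ¬ x > 0 := by omega
      simp only [carryG, if_neg hv, runlenB, if_pos hx, List.replicate_succ, List.drop_succ_cons,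
        List.cons_append]
      rw [ih last]
    · simp [runlenB, hx, carryG]

-- the suffix after the maximal non-positive run is empty or starts with a positive value
theorem drop_runlen_head (xs : List Int) :
    xs.drop (runlenB xs) = [] ∨ ∃ h t, xs.drop (runlenB xs) = h :: t ∧ 0 < h := by
  induction xs with
  | nil => left; rfl
  | cons x xs ih =>
    by_cases hx : x ≤ 0
    · simpa [runlenB, hx] using ih
    · right; exact ⟨x, xs, by simp [runlenB, hx], by omega⟩

-- on a suffix that is empty or starts positive, B's run builder equals the carry recursion (any 'last')
theorem build_eq_carry (n : Nat) (ys : List Int) (last : Option Int) (hlen : ys.length ≤ n)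
    (hshape : ys = [] ∨ ∃ h t, ys = h :: t ∧ 0 < h) : buildB ys = carryG last ys := by
  induction n generalizing ys last with
  | zero =>
    have : ys = [] := List.eq_nil_of_length_eq_zero (by omega)
    subst this; simp [buildB, carryG]
  | succ n ih =>
    rcases hshape with h | ⟨h, t, rfl, hpos⟩
    · subst h; simp [buildB, carryG]
    · have hv : h > 0 := hpos
      rw [show buildB (h :: t)
            = List.replicate (1 + runlenB t) (some h) ++ buildB (t.drop (runlenB t)) from by
          simp [buildB],
        show carryG last (h :: t) = some h :: carryG (some h) t from by simp [carryG, hv],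
        carryG_run t (some h)]
      have hlen' : (t.drop (runlenB t)).length ≤ n := by
        have := List.length_drop (l := t) (i := runlenB t)
        simp at hlen ⊢; omega
      rw [ih (t.drop (runlenB t)) (some h) hlen' (drop_runlen_head t)]
      simp [List.replicate_succ, Nat.add_comm]

-- ===== VERDICT (by name: the statement is the Claim_ definition above) =====
theorem get_HH2_spec : Claim_equal_get_HH2 := by
  intro HH1 _
  unfold Spec_get_HH2 get_HH2 get_HH2_alt
  rw [PySem.List.foldl_pyRange_zero_pyGetD' HH1 0
        (fun acc hh1 => getHH2StepA acc hh1) (([] : List (Option Int)), (0 : Int))]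
  rw [loop_invariant HH1 [] 0 none le_rfl (fun _ => rfl) (fun h => absurd rfl h)]
  rw [carryG_run HH1 none,
    build_eq_carry (HH1.drop (runlenB HH1)).length _ none le_rfl (drop_runlen_head HH1)]
  simp
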